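-- pv_equiv track=rewrite | github.com/GuutLemon/CyberSecStudy | Python/Advent_of_codes/2020/day9.py | find_encryption_weakness
-- ===== SOURCE A (Python) =====
-- def find_encryption_weakness(nums, error):
--     for i in range(len(nums)):
--         nums_lst = []
--         for j in range(i, len(nums)):
--             nums_lst.append(nums[j])
--             if sum(nums_lst) == error:
--                 return min(nums_lst) + max(nums_lst)
--             elif sum(nums_lst) > error:
--                 break
-- ===== SOURCE B (Python) =====
-- def find_encryption_weakness(nums, error):
--     # Prefix-sum table: the sum of any window nums[i:j+1] is pref[j+1] - pref[i],
--     # so the search only compares precomputed table entries; min/max are computed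
--     # once, in a single pass over the found slice, instead of per extension step.
--     pref = [0]
--     for x in nums:
--         pref.append(pref[-1] + x)
--     n = len(nums)
--     for i in range(n):
--         target = pref[i] + error
--         j = i
--         while j < n and pref[j + 1] < target:
--             j += 1
--         if j < n and pref[j + 1] == target:
--             w = nums[i:j + 1]
--             return min(w) + max(w)
--     return None
-- ===== Notes on version B (the rewrite author's own statement) =====
-- stated objective: alternative
-- what changed: B precomputes a prefix-sum table once so every window sum is a table-difference lookup and A's per-step window-list rebuild with sum() rescans disappears; min/max are computed in one final pass over the found slice instead of being tracked while extending.
import Mathlib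
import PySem

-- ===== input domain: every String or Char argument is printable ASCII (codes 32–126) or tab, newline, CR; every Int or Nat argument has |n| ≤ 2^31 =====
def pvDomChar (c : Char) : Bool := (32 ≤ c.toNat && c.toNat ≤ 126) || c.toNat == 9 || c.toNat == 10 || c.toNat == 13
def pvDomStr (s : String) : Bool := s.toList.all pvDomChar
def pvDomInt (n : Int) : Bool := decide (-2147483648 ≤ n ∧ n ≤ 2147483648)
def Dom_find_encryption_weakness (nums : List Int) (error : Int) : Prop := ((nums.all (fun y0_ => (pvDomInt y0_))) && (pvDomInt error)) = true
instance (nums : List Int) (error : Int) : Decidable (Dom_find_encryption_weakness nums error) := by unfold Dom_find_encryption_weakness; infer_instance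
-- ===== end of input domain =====

-- B replaces A's per-step window-list rebuild and sum() rescans by a precomputed
-- prefix-sum table (window sum = table difference) with min/max taken in one final
-- pass over the found slice (alternative algorithm; identical results).


-- ===== PORT A =====
-- inner loop: 'for j in range(i, len(nums))' walks the suffix nums[i:]; nums_lst is the
-- window list A rebuilds element by element, re-summing and re-scanning it each step.
def fewA_inner (error : Int) : List Int → List Int → Option Int
  | _, [] => none
  | nums_lst, x :: rest =>
    let lst' := nums_lst ++ [x]
    if lst'.sum = error then
      match PySem.List.min? lst' (fun y => y), PySem.List.max? lst' (fun y => y) with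
      | some mn, some mx => some (mn + mx)
      | _, _ => none
    else if lst'.sum > error then none
    else fewA_inner error lst' rest

-- outer loop: 'for i in range(len(nums))' = recursion over suffixes of nums
def fewA_outer (error : Int) : List Int → Option Int
  | [] => none
  | x :: rest =>
    match fewA_inner error [] (x :: rest) with
    | some v => some v
    | none => fewA_outer error rest

def find_encryption_weakness (nums : List Int) (error : Int) : Option Int :=
  fewA_outer error nums

-- ===== PORT B =====
-- 'pref = [0]; for x in nums: pref.append(pref[-1] + x)'
-- (pref is never empty, so pref[-1] = getLastD 0 is exact)
def fewB_pref (nums : List Int) : List Int :=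
  nums.foldl (fun p x => p ++ [p.getLastD 0 + x]) [0]

-- 'while j < n and pref[j + 1] < target: j += 1', counted down by the structural
-- fuel n - j (the loop runs at most that many times)
-- (j + 1 ≤ n < len(pref) whenever the lookup happens, so getD is exact)
def fewB_whileF (pref : List Int) (n : Nat) (target : Int) : Nat → Nat → Nat
  | 0, j => j
  | fuel + 1, j =>
    if j < n ∧ pref.getD (j + 1) 0 < target then fewB_whileF pref n target fuel (j + 1) else j

def fewB_while (pref : List Int) (n : Nat) (target : Int) (j : Nat) : Nat :=
  fewB_whileF pref n target (n - j) j

-- 'for i in range(n)' with the while-search and the one-shot min/max of the slice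
-- nums[i:j+1]; 0 ≤ i ≤ j+1, so the slice is drop/take (PySem.List.slice_natCast)
def fewB_outerF (nums pref : List Int) (n : Nat) (error : Int) : Nat → Nat → Option Int
  | 0, _ => none
  | fuel + 1, i =>
    if i < n then
    let target := pref.getD i 0 + error
    let j := fewB_while pref n target i
    if j < n ∧ pref.getD (j + 1) 0 = target then
      -- w = nums[i:j+1] inlined into the two scans
      match PySem.List.min? ((nums.drop i).take (j + 1 - i)) (fun y => y),
            PySem.List.max? ((nums.drop i).take (j + 1 - i)) (fun y => y) with
      | some mn, some mx => some (mn + mx)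
      | _, _ => none
    else fewB_outerF nums pref n error fuel (i + 1)
    else none

-- 'for i in range(n)', counted by the structural fuel n - i
def fewB_outer (nums pref : List Int) (n : Nat) (error : Int) (i : Nat) : Option Int :=
  fewB_outerF nums pref n error (n - i) i

def find_encryption_weakness_alt (nums : List Int) (error : Int) : Option Int :=
  fewB_outer nums (fewB_pref nums) nums.length error 0

-- ===== PRECONDITION & SPEC =====
def Spec_find_encryption_weakness (nums : List Int) (error : Int) (out : Option Int) : Prop := out = find_encryption_weakness_alt nums error
instance (nums : List Int) (error : Int) (out : Option Int) : Decidable (Spec_find_encryption_weakness nums error out) := by unfold Spec_find_encryption_weakness; infer_instance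

-- ===== CLAIM (what is proved, stated in full; the proofs are below) =====
def Claim_equal_find_encryption_weakness : Prop := ∀ (nums : List Int) (error : Int), Dom_find_encryption_weakness nums error → Spec_find_encryption_weakness nums error (find_encryption_weakness nums error)

-- ===== LEMMAS AND PROOFS =====

-- the prefix list, written as a scan from a running sum
def fewScan (s : Int) : List Int → List Int
  | [] => []
  | x :: xs => (s + x) :: fewScan (s + x) xs

-- what B returns once the while-search for start i has stopped at j'
def fewRes (nums : List Int) (error : Int) (i j' : Nat) : Option Int :=
  if j' < nums.length ∧ (fewB_pref nums).getD (j' + 1) 0 = (fewB_pref nums).getD i 0 + error then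
    match PySem.List.min? ((nums.drop i).take (j' + 1 - i)) (fun y => y),
          PySem.List.max? ((nums.drop i).take (j' + 1 - i)) (fun y => y) with
    | some mn, some mx => some (mn + mx)
    | _, _ => none
  else none

theorem fewB_while_eq (pref : List Int) (n : Nat) (target : Int) (j : Nat) :
    fewB_while pref n target j
      = if j < n ∧ pref.getD (j + 1) 0 < target then fewB_while pref n target (j + 1) else j := by
  unfold fewB_while
  by_cases hj : j < n
  · have h1 : n - j = (n - (j + 1)) + 1 := by omega
    rw [h1]
    simp only [fewB_whileF]
  · have h1 : n - j = 0 := by omega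
    rw [h1]
    simp only [fewB_whileF]
    rw [if_neg (by omega : ¬ (j < n ∧ pref.getD (j + 1) 0 < target))]

theorem fewB_pref_foldl (l : List Int) : ∀ (p : List Int) (s : Int), p.getLastD 0 = s →
    List.foldl (fun p x => p ++ [p.getLastD 0 + x]) p l = p ++ fewScan s l := by
  induction l with
  | nil => intro p s _; simp [fewScan]
  | cons x xs ih =>
    intro p s hs
    simp only [List.foldl, fewScan]
    rw [hs, ih (p ++ [s + x]) (s + x) (by simp)]
    simp

theorem fewScan_getD (l : List Int) : ∀ (s : Int) (k : Nat), k < l.length →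
    (fewScan s l).getD k 0 = s + (l.take (k + 1)).sum := by
  induction l with
  | nil => intro s k h; simp at h
  | cons x xs ih =>
    intro s k h
    cases k with
    | zero => simp [fewScan]
    | succ k =>
      simp only [fewScan, List.getD_cons_succ, List.take_succ_cons, List.sum_cons]
      rw [ih (s + x) k (by simpa using h)]
      ring

theorem fewB_pref_getD (nums : List Int) (k : Nat) (hk : k ≤ nums.length) :
    (fewB_pref nums).getD k 0 = (nums.take k).sum := by
  unfold fewB_pref
  rw [fewB_pref_foldl nums [0] 0 rfl]
  cases k with
  | zero => simp
  | succ k =>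
    simp only [List.cons_append, List.nil_append, List.getD_cons_succ]
    rw [fewScan_getD nums 0 k (by omega)]
    simp

theorem few_slice_sum (nums : List Int) (i j : Nat) (hij : i ≤ j) :
    ((nums.drop i).take (j - i)).sum = (nums.take j).sum - (nums.take i).sum := by
  have h : nums.take j = nums.take i ++ (nums.drop i).take (j - i) := by
    rw [← List.take_add]
    congr 1
    omega
  rw [h, List.sum_append]
  ring

theorem few_take_snoc (nums : List Int) (i j : Nat) (hij : i ≤ j) (hj : j < nums.length) :
    (nums.drop i).take (j - i) ++ [nums[j]'hj] = (nums.drop i).take (j + 1 - i) := by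
  have hlen : j - i < (nums.drop i).length := by simp; omega
  have hget : (nums.drop i)[j - i]'hlen = nums[j]'hj := by
    simp only [List.getElem_drop]
    congr 1
    omega
  have h1 : j + 1 - i = (j - i) + 1 := by omega
  rw [h1, List.take_add_one, List.getElem?_eq_getElem hlen, hget]
  rfl

-- A's inner loop, entered with window nums[i:j] and rest nums[j:], computes exactly
-- B's table search continued from j.
theorem few_inner_eq (nums : List Int) (error : Int) (i : Nat) :
    ∀ (k j : Nat), k = nums.length - j → i ≤ j → j ≤ nums.length →
      fewA_inner error ((nums.drop i).take (j - i)) (nums.drop j)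
        = fewRes nums error i
            (fewB_while (fewB_pref nums) nums.length ((fewB_pref nums).getD i 0 + error) j) := by
  intro k
  induction k with
  | zero =>
    intro j hk hij hjn
    have hj : j = nums.length := by omega
    subst hj
    rw [List.drop_length, fewA_inner, fewB_while_eq]
    simp [fewRes]
  | succ k ih =>
    intro j hk hij hjn
    have hj : j < nums.length := by omega
    rw [List.drop_eq_getElem_cons hj, fewA_inner]
    have hsnoc := few_take_snoc nums i j hij hj
    have htar : (fewB_pref nums).getD i 0 = (nums.take i).sum :=
      fewB_pref_getD nums i (by omega)
    have hpj : (fewB_pref nums).getD (j + 1) 0 = (nums.take (j + 1)).sum :=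
      fewB_pref_getD nums (j + 1) (by omega)
    have hsum : ((nums.drop i).take (j + 1 - i)).sum
        = (nums.take (j + 1)).sum - (nums.take i).sum :=
      few_slice_sum nums i (j + 1) (by omega)
    rw [hsnoc, fewB_while_eq]
    by_cases heq : ((nums.drop i).take (j + 1 - i)).sum = error
    · -- found: the while loop stops at j and B's equality test succeeds
      rw [if_neg (by rw [hpj, htar]; omega : ¬ (j < nums.length ∧ (fewB_pref nums).getD (j + 1) 0
            < (fewB_pref nums).getD i 0 + error))]
      rw [if_pos heq]
      unfold fewRes
      rw [if_pos ⟨hj, by rw [hpj, htar]; omega⟩]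
    · by_cases hgt : ((nums.drop i).take (j + 1 - i)).sum > error
      · -- overshoot: A breaks; the while loop stops at j and the equality test fails
        rw [if_neg (by rw [hpj, htar]; omega : ¬ (j < nums.length ∧ (fewB_pref nums).getD (j + 1) 0
              < (fewB_pref nums).getD i 0 + error))]
        rw [if_neg heq, if_pos hgt]
        unfold fewRes
        rw [if_neg (by rw [hpj, htar]; omega)]
      · -- undershoot: both continue with j + 1
        rw [if_pos (⟨hj, by rw [hpj, htar]; omega⟩ : j < nums.length ∧ (fewB_pref nums).getD (j + 1) 0
              < (fewB_pref nums).getD i 0 + error)]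
        rw [if_neg heq, if_neg hgt]
        exact ih (j + 1) (by omega) (by omega) (by omega)

-- the while-search never moves left
theorem few_while_ge (pref : List Int) (n : Nat) (t : Int) :
    ∀ (k j : Nat), n - j ≤ k → j ≤ fewB_while pref n t j := by
  intro k
  induction k with
  | zero =>
    intro j h
    rw [fewB_while_eq, if_neg (by omega : ¬ (j < n ∧ pref.getD (j + 1) 0 < t))]
  | succ k ih =>
    intro j h
    rw [fewB_while_eq]
    split_ifs with hc
    · have := ih (j + 1) (by omega)
      omega
    · exact le_refl j

theorem fewB_outer_eq_unfold (nums pref : List Int) (error : Int) (i : Nat) :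
    fewB_outer nums pref nums.length error i
      = if i < nums.length then
          (if fewB_while pref nums.length (pref.getD i 0 + error) i < nums.length ∧
              pref.getD (fewB_while pref nums.length (pref.getD i 0 + error) i + 1) 0
                = pref.getD i 0 + error then
            match PySem.List.min? ((nums.drop i).take
                    (fewB_while pref nums.length (pref.getD i 0 + error) i + 1 - i)) (fun y => y),
                  PySem.List.max? ((nums.drop i).take
                    (fewB_while pref nums.length (pref.getD i 0 + error) i + 1 - i)) (fun y => y) with
            | some mn, some mx => some (mn + mx)
            | _, _ => none
          else fewB_outer nums pref nums.length error (i + 1))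
        else none := by
  unfold fewB_outer
  by_cases hi : i < nums.length
  · have h1 : nums.length - i = (nums.length - (i + 1)) + 1 := by omega
    rw [h1]
    simp only [fewB_outerF]
  · have h1 : nums.length - i = 0 := by omega
    rw [h1]
    simp only [fewB_outerF]
    rw [if_neg hi]

theorem few_outer_eq (nums : List Int) (error : Int) :
    ∀ (k i : Nat), k = nums.length - i → i ≤ nums.length →
      fewA_outer error (nums.drop i) = fewB_outer nums (fewB_pref nums) nums.length error i := by
  intro k
  induction k with
  | zero =>
    intro i hk hi
    have : i = nums.length := by omega
    subst this
    rw [List.drop_length, fewA_outer]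
    unfold fewB_outer
    simp only [Nat.sub_self, fewB_outerF]
  | succ k ih =>
    intro i hk hi
    have hlt : i < nums.length := by omega
    rw [List.drop_eq_getElem_cons hlt, fewA_outer, ← List.drop_eq_getElem_cons hlt]
    have hinner := few_inner_eq nums error i (nums.length - i) i rfl (le_refl i) (by omega)
    rw [show (nums.drop i).take (i - i) = ([] : List Int) by simp] at hinner
    rw [hinner, fewB_outer_eq_unfold nums (fewB_pref nums) error i, if_pos hlt]
    unfold fewRes
    by_cases hcond : fewB_while (fewB_pref nums) nums.length ((fewB_pref nums).getD i 0 + error) i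
        < nums.length ∧ (fewB_pref nums).getD
          (fewB_while (fewB_pref nums) nums.length ((fewB_pref nums).getD i 0 + error) i + 1) 0
          = (fewB_pref nums).getD i 0 + error
    · rw [if_pos hcond, if_pos hcond]
      have hge : i ≤ fewB_while (fewB_pref nums) nums.length ((fewB_pref nums).getD i 0 + error) i :=
        few_while_ge _ _ _ (nums.length - i) i (le_refl _)
      have hne : (nums.drop i).take
          (fewB_while (fewB_pref nums) nums.length ((fewB_pref nums).getD i 0 + error) i + 1 - i)
          ≠ ([] : List Int) := by
        have hlen : ((nums.drop i).take
            (fewB_while (fewB_pref nums) nums.length ((fewB_pref nums).getD i 0 + error) i + 1 - i)).length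
            = min (fewB_while (fewB_pref nums) nums.length ((fewB_pref nums).getD i 0 + error) i + 1 - i)
              (nums.length - i) := by
          rw [List.length_take, List.length_drop]
        intro h
        rw [h] at hlen
        simp only [List.length_nil] at hlen
        omega
      cases hmn : PySem.List.min? ((nums.drop i).take
          (fewB_while (fewB_pref nums) nums.length ((fewB_pref nums).getD i 0 + error) i + 1 - i))
          (fun y => y) with
      | none => exact absurd ((PySem.List.min?_eq_none_iff _ _).1 hmn) hne
      | some mn =>
        cases hmx : PySem.List.max? ((nums.drop i).take
            (fewB_while (fewB_pref nums) nums.length ((fewB_pref nums).getD i 0 + error) i + 1 - i))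
            (fun y => y) with
        | none => exact absurd ((PySem.List.max?_eq_none_iff _ _).1 hmx) hne
        | some mx => rfl
    · rw [if_neg hcond, if_neg hcond]
      exact ih (i + 1) (by omega) (by omega)

-- ===== VERDICT (by name: the statement is the Claim_ definition above) =====
theorem find_encryption_weakness_spec : Claim_equal_find_encryption_weakness := by
  intro nums error _
  show find_encryption_weakness nums error = find_encryption_weakness_alt nums error
  unfold find_encryption_weakness find_encryption_weakness_alt
  have := few_outer_eq nums error nums.length 0 (by omega) (by omega)
  simpa using this
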